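-- pv_equiv track=rewrite | github.com/nixternal/CodingChallenges | AdventOfCode/2017/06.py | part_two
-- ===== SOURCE A (Python) =====
-- def part_two(data: list) -> int:
--     """
--     Finds the cycle length of the infinite loop in memory bank redistribution.
--
--     Parameters:
--     data (list): A list of integers representing memory banks.
--
--     Returns:
--     int: The length of the loop that forms when a configuration repeats.
--     """
--
--     seen_configs = {}                       # Dictionary to store seen configs
--     banks = data[:]                         # Copy to avoid modifying original
--     steps = 0                               # Count total redistribution cycles
--
--     while tuple(banks) not in seen_configs:
--         seen_configs[tuple(banks)] = steps  # Store config w/ its step count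
--         steps += 1                          # Increment step count
--
--         # Find the index of the first max value
--         max_blocks = max(banks)
--         idx = banks.index(max_blocks)       # Get first occurrence of max
--
--         banks[idx] = 0                      # Clear the max bank
--
--         # Redistribute blocks cyclically
--         for _ in range(max_blocks):
--             idx = (idx + 1) % len(banks)    # Move to next index circularly
--             banks[idx] += 1
--
--     # Loop Size = Current Step Count - First Occurrence Step Count
--     return steps - seen_configs[tuple(banks)]
-- ===== SOURCE B (Python) =====
-- def part_two(data: list) -> int:
--     """Cycle length of the repeating redistribution state; each redistribution
--     distributes blocks in bulk: +q = m//n to every bank via one comprehension,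
--     then one extra block to the r = m%n banks after the source."""
--     seen = {}
--     banks = tuple(data)
--     n = len(banks)
--     while banks not in seen:
--         seen[banks] = len(seen)
--         m = max(banks)
--         idx = banks.index(m)
--         q, r = divmod(m, n) if m > 0 else (0, 0)
--         b = [x + q for x in banks]
--         b[idx] -= m
--         for i in range(idx + 1, idx + r + 1):
--             b[i % n] += 1
--         banks = tuple(b)
--     return len(seen) - seen[banks]
-- ===== Notes on version B (the rewrite author's own statement) =====
-- stated objective: faster
-- what changed: Each redistribution step distributes all blocks at once with divmod arithmetic: one comprehension adds q = m//n to every bank, the source bank is reset by subtracting m, and a short wrap-around loop hands one extra block to the r = m%n banks after the source, replacing A's one-by-one cyclic increment walk of max_blocks iterations; the cycle length is read off as len(seen) - first_step. Pre_ excludes only the empty list, on which A raises ValueError (max of empty sequence).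
import Mathlib
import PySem

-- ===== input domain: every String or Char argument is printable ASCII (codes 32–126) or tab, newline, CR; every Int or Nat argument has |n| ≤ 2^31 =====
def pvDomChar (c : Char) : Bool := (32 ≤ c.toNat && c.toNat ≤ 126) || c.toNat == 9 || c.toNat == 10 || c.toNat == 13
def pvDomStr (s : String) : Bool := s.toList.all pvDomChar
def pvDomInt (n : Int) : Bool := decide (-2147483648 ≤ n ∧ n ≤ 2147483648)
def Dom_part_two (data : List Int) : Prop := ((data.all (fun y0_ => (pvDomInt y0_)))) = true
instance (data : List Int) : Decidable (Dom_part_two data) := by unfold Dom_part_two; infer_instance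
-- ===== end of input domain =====

-- B replaces A's one-increment-at-a-time redistribution walk by a single divmod
-- arithmetic pass per step (objective: faster). Both loop ports carry a fuel
-- counter that only bounds the iteration count; both ports receive the same
-- fuel, and the equivalence claim does not depend on its size.

-- ===== PORT A =====
-- the body of A's inner for-loop: advance the cyclic pointer, add 1 there
def pvWalk (st : Int × List Int) : Int × List Int :=
  let idx := PySem.Int.mod (st.1 + 1) (st.2.length : Int)
  (idx, PySem.List.pySetD st.2 idx (PySem.List.pyGetD st.2 idx 0 + 1))

-- one redistribution step of A: zero the first maximal bank, then walk the
-- cyclic pointer adding single blocks, max_blocks times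
def pvStepA (banks : List Int) : List Int :=
  let max_blocks := (PySem.List.max? banks (fun x => x)).getD 0
  let idx : Int := ((PySem.List.index? banks max_blocks).getD 0 : Nat)
  let banks1 := PySem.List.pySetD banks idx 0
  ((PySem.List.pyRange 0 max_blocks 1).foldl (fun st _ => pvWalk st) (idx, banks1)).2

-- fuel for the while loops: an over-estimate of the number of loop iterations
def pvFuel (data : List Int) : Nat := ((data.length + 2) * 2 ^ 40) ^ data.length + 1

def pvLoopA : Nat → PySem.Dict (List Int) Int → List Int → Int → Int
  | 0, _, _, _ => 0
  | fuel + 1, seen, banks, steps =>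
    match seen.get? banks with
    | some first => steps - first
    | none => pvLoopA fuel (seen.insert banks steps) (pvStepA banks) (steps + 1)

def part_two (data : List Int) : Int :=
  pvLoopA (pvFuel data) PySem.Dict.empty data 0

-- ===== PORT B =====
-- one redistribution step of B: one bulk pass gives every bank q = m // n
-- blocks (the source is reset by subtracting m), then the first r = m % n banks
-- after the source get one extra block each
def pvStepB (banks : List Int) : List Int :=
  let n : Int := banks.length
  let m := (PySem.List.max? banks (fun x => x)).getD 0
  let idx : Int := ((PySem.List.index? banks m).getD 0 : Nat)
  let qr : Int × Int := if 0 < m then (PySem.Int.floordiv m n, PySem.Int.mod m n) else (0, 0)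
  let b1 := banks.map (fun x => x + qr.1)
  let b2 := PySem.List.pySetD b1 idx (PySem.List.pyGetD b1 idx 0 - m)
  (PySem.List.pyRange (idx + 1) (idx + qr.2 + 1) 1).foldl
    (fun bb i => PySem.List.pySetD bb (PySem.Int.mod i n)
      (PySem.List.pyGetD bb (PySem.Int.mod i n) 0 + 1)) b2

def pvLoopB : Nat → PySem.Dict (List Int) Int → List Int → Int
  | 0, _, _ => 0
  | fuel + 1, seen, banks =>
    match seen.get? banks with
    | some first => (seen.size : Int) - first
    | none => pvLoopB fuel (seen.insert banks (seen.size : Int)) (pvStepB banks)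

def part_two_alt (data : List Int) : Int :=
  pvLoopB (pvFuel data) PySem.Dict.empty data

-- ===== PRECONDITION & SPEC =====
-- Pre_ excludes only the empty list, on which A raises ValueError (max of an
-- empty sequence); B raises there too.
def Pre_part_two (data : List Int) : Prop := data ≠ []
instance (data : List Int) : Decidable (Pre_part_two data) := by unfold Pre_part_two; infer_instance
def pvWitness_part_two : List Int := ([0, 2, 7, 0])

def Spec_part_two (data : List Int) (out : Int) : Prop := out = part_two_alt data
instance (data : List Int) (out : Int) : Decidable (Spec_part_two data out) := by unfold Spec_part_two; infer_instance

-- ===== CLAIM (what is proved, stated in full; the proofs are below) =====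
def Claim_equal_part_two : Prop := ∀ (data : List Int), Dom_part_two data → Pre_part_two data → Spec_part_two data (part_two data)

-- ===== LEMMAS AND PROOFS =====

-- a fold that ignores the list elements is an iterate of the state function
theorem pv_foldl_const {α σ : Type} (g : σ → σ) :
    ∀ (l : List α) (init : σ), l.foldl (fun s _ => g s) init = g^[l.length] init := by
  intro l
  induction l with
  | nil => intro init; rfl
  | cons x t ih =>
      intro init
      simp [List.foldl_cons, ih, Function.iterate_succ_apply]

theorem pv_div_succ_lt (n a : Int) (hn : 0 < n) (h : a % n + 1 < n) :
    (a + 1) / n = a / n ∧ (a + 1) % n = a % n + 1 := by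
  have h0 : 0 ≤ a % n := Int.emod_nonneg _ (ne_of_gt hn)
  have ha : a + 1 = (a % n + 1) + n * (a / n) := by
    have := Int.mul_ediv_add_emod a n; linarith
  constructor
  · rw [ha, Int.add_mul_ediv_left _ _ (ne_of_gt hn),
      Int.ediv_eq_zero_of_lt (by omega) h, zero_add]
  · rw [ha, Int.add_mul_emod_self_left, Int.emod_eq_of_lt (by omega) h]

theorem pv_div_succ_eq (n a : Int) (hn : 0 < n) (h : a % n + 1 = n) :
    (a + 1) / n = a / n + 1 ∧ (a + 1) % n = 0 := by
  have h0 : 0 ≤ a % n := Int.emod_nonneg _ (ne_of_gt hn)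
  have ha : a + 1 = (a % n + 1) + n * (a / n) := by
    have := Int.mul_ediv_add_emod a n; linarith
  constructor
  · rw [ha, Int.add_mul_ediv_left _ _ (ne_of_gt hn), h,
      Int.ediv_self (ne_of_gt hn), add_comm]
  · rw [ha, Int.add_mul_emod_self_left, h, Int.emod_self]

-- closed form for k rounds of A's cyclic single-increment walk
theorem pv_iterate_closed (xs : List Int) (j : Int) (k : Nat)
    (hj0 : 0 ≤ j) (hjn : j < (xs.length : Int)) :
    pvWalk^[k] (j, xs)
    = (PySem.Int.mod (j + k) (xs.length : Int),
       (PySem.List.pyRange 0 (xs.length : Int) 1).map (fun i =>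
         PySem.List.pyGetD xs i 0 + PySem.Int.floordiv (k : Int) (xs.length : Int) +
         (if PySem.Int.mod (i - j - 1) (xs.length : Int) < PySem.Int.mod (k : Int) (xs.length : Int)
          then 1 else 0))) := by
  have hn : 0 < (xs.length : Int) := lt_of_le_of_lt hj0 hjn
  induction k with
  | zero =>
      simp only [Function.iterate_zero, id_eq, Nat.cast_zero]
      rw [Prod.mk.injEq]
      constructor
      · rw [add_zero, PySem.Int.mod_eq_emod_of_pos hn, Int.emod_eq_of_lt hj0 hjn]
      · have hcong : ∀ i ∈ PySem.List.pyRange 0 ((xs.length : Nat) : Int) 1,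
            PySem.List.pyGetD xs i 0 + PySem.Int.floordiv (0 : Int) (xs.length : Int) +
              (if PySem.Int.mod (i - j - 1) (xs.length : Int) < PySem.Int.mod (0 : Int) (xs.length : Int)
               then (1 : Int) else 0)
            = PySem.List.pyGetD xs i 0 := by
          intro i _
          rw [PySem.Int.floordiv_eq_ediv_of_pos hn, PySem.Int.mod_eq_emod_of_pos hn,
            PySem.Int.mod_eq_emod_of_pos hn]
          have h1 := Int.emod_nonneg (i - j - 1) (ne_of_gt hn)
          rw [Int.zero_ediv, Int.zero_emod, if_neg (by omega)]
          ring
        rw [List.map_congr_left hcong, PySem.List.map_pyGetD_pyRange_zero']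
  | succ k ih =>
      rw [Function.iterate_succ_apply', ih]
      simp only [pvWalk, List.length_map, PySem.List.length_pyRange_one, sub_zero,
        Int.toNat_natCast]
      simp only [PySem.Int.mod_eq_emod_of_pos hn, PySem.Int.floordiv_eq_ediv_of_pos hn]
      push_cast
      rw [show j + ((k : Int) + 1) = j + (k : Int) + 1 from by ring]
      rw [Int.emod_add_emod]
      have ht0 : 0 ≤ (j + (k : Int) + 1) % (xs.length : Int) :=
        Int.emod_nonneg _ (ne_of_gt hn)
      have htn : (j + (k : Int) + 1) % (xs.length : Int) < (xs.length : Int) :=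
        Int.emod_lt_of_pos _ hn
      rw [PySem.List.pyGetD_map_pyRange_of_nonneg _ _ _ _ ht0 htn,
        PySem.List.pySetD_of_nonneg _ _ ht0]
      rw [Prod.mk.injEq]
      refine ⟨rfl, ?_⟩
      apply List.ext_getElem
      · simp [PySem.List.length_pyRange_one]
      · intro i hi1 hi2
        simp only [List.getElem_set, List.getElem_map, PySem.List.getElem_pyRange_one,
          zero_add]
        have hi' : ((i : Nat) : Int) < (xs.length : Int) := by
          simp only [List.length_map, PySem.List.length_pyRange_one, sub_zero,
            Int.toNat_natCast] at hi2
          exact_mod_cast hi2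
        have hi0 : (0 : Int) ≤ (i : Int) := Int.natCast_nonneg i
        have hr0 : 0 ≤ (k : Int) % (xs.length : Int) := Int.emod_nonneg _ (ne_of_gt hn)
        have hrn : (k : Int) % (xs.length : Int) < (xs.length : Int) :=
          Int.emod_lt_of_pos _ hn
        by_cases hit : ((i : Nat) : Int) = (j + (k : Int) + 1) % (xs.length : Int)
        · have hti : ((j + (k : Int) + 1) % (xs.length : Int)).toNat = i := by omega
          rw [if_pos hti, ← hit]
          have hto : (((i : Nat) : Int) - j - 1) % (xs.length : Int)
              = (k : Int) % (xs.length : Int) := by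
            rw [hit]
            calc ((j + (k : Int) + 1) % (xs.length : Int) - j - 1) % (xs.length : Int)
                = ((j + (k : Int) + 1) % (xs.length : Int) + (-j - 1)) % (xs.length : Int) := by
                  ring_nf
              _ = ((j + (k : Int) + 1) + (-j - 1)) % (xs.length : Int) := by
                  rw [Int.emod_add_emod]
              _ = (k : Int) % (xs.length : Int) := by ring_nf
          rw [hto]
          rcases eq_or_lt_of_le (by omega : (k : Int) % (xs.length : Int) + 1 ≤ (xs.length : Int)) with hc | hc
          · obtain ⟨hd, he⟩ := pv_div_succ_eq (xs.length : Int) (k : Int) hn hc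
            rw [hd, he]
            set P := PySem.List.pyGetD xs ((i : Nat) : Int) 0 with hP
            set q := (k : Int) / (xs.length : Int) with hq1
            set r := (k : Int) % (xs.length : Int) with hr1
            split_ifs <;> omega
          · obtain ⟨hd, he⟩ := pv_div_succ_lt (xs.length : Int) (k : Int) hn hc
            rw [hd, he]
            set P := PySem.List.pyGetD xs ((i : Nat) : Int) 0 with hP
            set q := (k : Int) / (xs.length : Int) with hq1
            set r := (k : Int) % (xs.length : Int) with hr1
            split_ifs <;> omega
        · have hti : ¬ (((j + (k : Int) + 1) % (xs.length : Int)).toNat = i) := by omega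
          rw [if_neg hti]
          have ho0 : 0 ≤ (((i : Nat) : Int) - j - 1) % (xs.length : Int) :=
            Int.emod_nonneg _ (ne_of_gt hn)
          have hon : (((i : Nat) : Int) - j - 1) % (xs.length : Int) < (xs.length : Int) :=
            Int.emod_lt_of_pos _ hn
          have hne : (((i : Nat) : Int) - j - 1) % (xs.length : Int)
              ≠ (k : Int) % (xs.length : Int) := by
            intro hEq
            apply hit
            have h2 : ((((i : Nat) : Int) - j - 1) - (k : Int)) % (xs.length : Int) = 0 :=
              Int.emod_eq_emod_iff_emod_sub_eq_zero.mp hEq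
            have h3 : (((i : Nat) : Int) - (j + (k : Int) + 1)) % (xs.length : Int) = 0 := by
              rw [show ((i : Nat) : Int) - (j + (k : Int) + 1)
                  = (((i : Nat) : Int) - j - 1) - (k : Int) from by ring]
              exact h2
            have h4 : ((i : Nat) : Int) % (xs.length : Int)
                = (j + (k : Int) + 1) % (xs.length : Int) :=
              Int.emod_eq_emod_iff_emod_sub_eq_zero.mpr h3
            rw [Int.emod_eq_of_lt hi0 hi'] at h4
            exact h4
          rcases eq_or_lt_of_le (by omega : (k : Int) % (xs.length : Int) + 1 ≤ (xs.length : Int)) with hc | hc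
          · obtain ⟨hd, he⟩ := pv_div_succ_eq (xs.length : Int) (k : Int) hn hc
            rw [hd, he]
            set P := PySem.List.pyGetD xs ((i : Nat) : Int) 0 with hP
            set q := (k : Int) / (xs.length : Int) with hq1
            set r := (k : Int) % (xs.length : Int) with hr1
            set O := (((i : Nat) : Int) - j - 1) % (xs.length : Int) with hO1
            split_ifs <;> omega
          · obtain ⟨hd, he⟩ := pv_div_succ_lt (xs.length : Int) (k : Int) hn hc
            rw [hd, he]
            set P := PySem.List.pyGetD xs ((i : Nat) : Int) 0 with hP
            set q := (k : Int) / (xs.length : Int) with hq1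
            set r := (k : Int) % (xs.length : Int) with hr1
            set O := (((i : Nat) : Int) - j - 1) % (xs.length : Int) with hO1
            split_ifs <;> omega

-- the window fold of B keeps the list length
theorem pv_foldl_bump_len (n : Int) : ∀ (l : List Int) (b : List Int),
    (l.foldl (fun bb i => PySem.List.pySetD bb (PySem.Int.mod i n)
      (PySem.List.pyGetD bb (PySem.Int.mod i n) 0 + 1)) b).length = b.length := by
  intro l
  induction l with
  | nil => intro b; rfl
  | cons x t ih => intro b; rw [List.foldl_cons, ih, PySem.List.length_pySetD]

-- closed form for B's wrap-around window of r single extra blocks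
theorem pv_window (n : Int) (b : List Int) (idx : Int) (r : Nat)
    (hlen : (b.length : Int) = n) (hn : 0 < n) (hr : (r : Int) ≤ n) :
    (PySem.List.pyRange (idx + 1) (idx + 1 + (r : Int)) 1).foldl
      (fun bb i => PySem.List.pySetD bb (PySem.Int.mod i n)
        (PySem.List.pyGetD bb (PySem.Int.mod i n) 0 + 1)) b
    = (PySem.List.pyRange 0 n 1).map (fun i =>
        PySem.List.pyGetD b i 0 +
        (if PySem.Int.mod (i - idx - 1) n < (r : Int) then 1 else 0)) := by
  subst hlen
  have hn' : 0 < (b.length : Int) := hn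
  revert hr
  induction r with
  | zero =>
      intro hr
      simp only [Nat.cast_zero, add_zero]
      rw [PySem.List.pyRange_one_eq_nil (le_refl _), List.foldl_nil]
      have hcong : ∀ i ∈ PySem.List.pyRange 0 ((b.length : Nat) : Int) 1,
          PySem.List.pyGetD b i 0 +
            (if PySem.Int.mod (i - idx - 1) (b.length : Int) < (0 : Int) then (1 : Int) else 0)
          = PySem.List.pyGetD b i 0 := by
        intro i _
        have h1 := PySem.Int.mod_nonneg (i - idx - 1) hn'
        rw [if_neg (by omega), add_zero]
      rw [List.map_congr_left hcong, PySem.List.map_pyGetD_pyRange_zero']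
  | succ r ih =>
      intro hr
      push_cast at hr ⊢
      have hrn : (r : Int) < (b.length : Int) := by omega
      rw [show idx + 1 + ((r : Int) + 1) = (idx + 1 + (r : Int)) + 1 from by ring]
      rw [PySem.List.pyRange_one_succ_right (by omega : idx + 1 ≤ idx + 1 + (r : Int))]
      rw [List.foldl_append, ih (by omega)]
      simp only [List.foldl_cons, List.foldl_nil]
      simp only [PySem.Int.mod_eq_emod_of_pos hn']
      have ht0 : 0 ≤ (idx + 1 + (r : Int)) % (b.length : Int) :=
        Int.emod_nonneg _ (ne_of_gt hn')
      have htn : (idx + 1 + (r : Int)) % (b.length : Int) < (b.length : Int) :=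
        Int.emod_lt_of_pos _ hn'
      rw [PySem.List.pyGetD_map_pyRange_of_nonneg _ _ _ _ ht0 htn,
        PySem.List.pySetD_of_nonneg _ _ ht0]
      apply List.ext_getElem
      · simp [PySem.List.length_pyRange_one]
      · intro i hi1 hi2
        simp only [List.getElem_set, List.getElem_map, PySem.List.getElem_pyRange_one,
          zero_add]
        have hi' : ((i : Nat) : Int) < (b.length : Int) := by
          simp only [List.length_map, PySem.List.length_pyRange_one, sub_zero,
            Int.toNat_natCast] at hi2
          exact_mod_cast hi2
        have hi0 : (0 : Int) ≤ (i : Int) := Int.natCast_nonneg i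
        by_cases hit : ((i : Nat) : Int) = (idx + 1 + (r : Int)) % (b.length : Int)
        · have hti : ((idx + 1 + (r : Int)) % (b.length : Int)).toNat = i := by omega
          rw [if_pos hti, ← hit]
          have hto : (((i : Nat) : Int) - idx - 1) % (b.length : Int) = (r : Int) := by
            rw [hit]
            calc ((idx + 1 + (r : Int)) % (b.length : Int) - idx - 1) % (b.length : Int)
                = ((idx + 1 + (r : Int)) % (b.length : Int) + (-idx - 1)) % (b.length : Int) := by
                  ring_nf
              _ = ((idx + 1 + (r : Int)) + (-idx - 1)) % (b.length : Int) := by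
                  rw [Int.emod_add_emod]
              _ = (r : Int) % (b.length : Int) := by ring_nf
              _ = (r : Int) := Int.emod_eq_of_lt (by omega) hrn
          rw [hto]
          rw [if_neg (lt_irrefl _), if_pos (by omega : (r : Int) < (r : Int) + 1)]
          ring
        · have hti : ¬ (((idx + 1 + (r : Int)) % (b.length : Int)).toNat = i) := by omega
          rw [if_neg hti]
          have ho0 : 0 ≤ (((i : Nat) : Int) - idx - 1) % (b.length : Int) :=
            Int.emod_nonneg _ (ne_of_gt hn')
          have hon : (((i : Nat) : Int) - idx - 1) % (b.length : Int) < (b.length : Int) :=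
            Int.emod_lt_of_pos _ hn'
          have hne : (((i : Nat) : Int) - idx - 1) % (b.length : Int) ≠ (r : Int) := by
            intro hEq
            apply hit
            have hEq' : (((i : Nat) : Int) - idx - 1) % (b.length : Int)
                = (r : Int) % (b.length : Int) := by
              rw [hEq, Int.emod_eq_of_lt (by omega) hrn]
            have h2 : ((((i : Nat) : Int) - idx - 1) - (r : Int)) % (b.length : Int) = 0 :=
              Int.emod_eq_emod_iff_emod_sub_eq_zero.mp hEq'
            have h3 : (((i : Nat) : Int) - (idx + 1 + (r : Int))) % (b.length : Int) = 0 := by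
              rw [show ((i : Nat) : Int) - (idx + 1 + (r : Int))
                  = (((i : Nat) : Int) - idx - 1) - (r : Int) from by ring]
              exact h2
            have h4 : ((i : Nat) : Int) % (b.length : Int)
                = (idx + 1 + (r : Int)) % (b.length : Int) :=
              Int.emod_eq_emod_iff_emod_sub_eq_zero.mpr h3
            rw [Int.emod_eq_of_lt hi0 hi'] at h4
            exact h4
          set P := PySem.List.pyGetD b ((i : Nat) : Int) 0 with hP
          set O := (((i : Nat) : Int) - idx - 1) % (b.length : Int) with hO1
          split_ifs <;> omega

-- the two step functions agree on nonempty lists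
theorem pv_step_eq (banks : List Int) (h : banks ≠ []) : pvStepA banks = pvStepB banks := by
  have hl : 0 < banks.length := List.length_pos_of_ne_nil h
  have hn : 0 < (banks.length : Int) := by exact_mod_cast hl
  obtain ⟨m, hm⟩ : ∃ m, PySem.List.max? banks (fun x => x) = some m := by
    cases hx : PySem.List.max? banks (fun x => x) with
    | none => exact absurd ((PySem.List.max?_eq_none_iff _ _).mp hx) h
    | some m => exact ⟨m, rfl⟩
  have hmem : m ∈ banks := PySem.List.max?_mem hm
  obtain ⟨kk, hk⟩ : ∃ kk, PySem.List.index? banks m = some kk := by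
    cases hx : PySem.List.index? banks m with
    | none => exact absurd hmem ((PySem.List.index?_eq_none_iff _ _).mp hx)
    | some kk => exact ⟨kk, rfl⟩
  obtain ⟨hklt, hval, -⟩ := PySem.List.getElem_of_index?_eq_some hk
  have hk0 : (0 : Int) ≤ ((kk : Nat) : Int) := Int.natCast_nonneg kk
  have hkn : ((kk : Nat) : Int) < (banks.length : Int) := by exact_mod_cast hklt
  have hgd : PySem.List.pyGetD banks ((kk : Nat) : Int) 0 = m := by
    rw [PySem.List.pyGetD_natCast, List.getD_eq_getElem _ _ hklt, hval]
  simp only [pvStepA, pvStepB, hm, hk, Option.getD_some]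
  by_cases hmp : 0 < m
  · rw [if_pos hmp]
    try dsimp only
    rw [pv_foldl_const pvWalk, PySem.List.length_pyRange_one]
    rw [pv_iterate_closed _ _ _ hk0 (by rw [PySem.List.length_pySetD]; exact hkn)]
    simp only [PySem.List.length_pySetD]
    try dsimp only
    have hcast : (((m - 0).toNat : Nat) : Int) = m := by omega
    rw [hcast]
    have hmod0 : 0 ≤ PySem.Int.mod m (banks.length : Int) := PySem.Int.mod_nonneg m hn
    have hmodlt : PySem.Int.mod m (banks.length : Int) < (banks.length : Int) :=
      PySem.Int.mod_lt m hn
    have hmm2 : (((PySem.Int.mod m (banks.length : Int)).toNat : Nat) : Int)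
        = PySem.Int.mod m (banks.length : Int) := Int.toNat_of_nonneg hmod0
    rw [show ((kk : Nat) : Int) + PySem.Int.mod m (banks.length : Int) + 1
        = ((kk : Nat) : Int) + 1 + (((PySem.Int.mod m (banks.length : Int)).toNat : Nat) : Int)
        from by rw [hmm2]; ring]
    rw [pv_window _ _ _ _ (by rw [PySem.List.length_pySetD, List.length_map])
      hn (by rw [hmm2]; exact le_of_lt hmodlt)]
    rw [hmm2]
    apply List.map_congr_left
    intro i hi
    rw [PySem.List.mem_pyRange_one] at hi
    obtain ⟨hi0, hiN⟩ := hi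
    have hii : i = ((i.toNat : Nat) : Int) := (Int.toNat_of_nonneg hi0).symm
    have hklt1 : kk < (banks.map (fun x => x + PySem.Int.floordiv m (banks.length : Int))).length := by
      rw [List.length_map]; exact hklt
    have hb1 : ∀ (j : Nat) (hj : j < banks.length),
        PySem.List.pyGetD (banks.map (fun x => x + PySem.Int.floordiv m (banks.length : Int)))
          ((j : Nat) : Int) 0
        = banks[j]'hj + PySem.Int.floordiv m (banks.length : Int) := by
      intro j hj
      rw [PySem.List.pyGetD_natCast, List.getD_eq_getElem _ _ (by rw [List.length_map]; exact hj),
        List.getElem_map]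
    rw [hii, PySem.List.pyGetD_pySetD_natCast banks kk i.toNat 0 0 hklt,
      PySem.List.pyGetD_pySetD_natCast _ kk i.toNat _ 0 hklt1]
    by_cases hc : i.toNat = kk
    · rw [if_pos hc, if_pos hc, hb1 kk hklt, hval]
      try ring
    · rw [if_neg hc, if_neg hc, hb1 i.toNat (by omega),
        PySem.List.pyGetD_natCast, List.getD_eq_getElem _ _ (by omega)]
      try ring
  · rw [if_neg hmp]
    try dsimp only
    rw [PySem.List.pyRange_one_eq_nil (by omega : m ≤ 0)]
    simp only [List.foldl_nil]
    rw [show ((kk : Nat) : Int) + 0 + 1 = ((kk : Nat) : Int) + 1 from by ring]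
    rw [PySem.List.pyRange_one_eq_nil (le_refl _), List.foldl_nil]
    have hmap0 : banks.map (fun x => x + (0 : Int)) = banks := by simp
    rw [hmap0, hgd, sub_self]

-- B's step keeps the list nonempty
theorem pv_stepB_ne_nil (banks : List Int) (h : banks ≠ []) : pvStepB banks ≠ [] := by
  have hl : 0 < banks.length := List.length_pos_of_ne_nil h
  intro hc
  have hlc := congrArg List.length hc
  simp only [pvStepB] at hlc
  rw [pv_foldl_bump_len, PySem.List.length_pySetD, List.length_map, List.length_nil] at hlc
  omega

-- the two while loops agree when A's step counter equals B's dict size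
theorem pv_loop_eq : ∀ (fuel : Nat) (seen : PySem.Dict (List Int) Int) (banks : List Int)
    (steps : Int), banks ≠ [] → steps = (seen.size : Int) →
    pvLoopA fuel seen banks steps = pvLoopB fuel seen banks := by
  intro fuel
  induction fuel with
  | zero => intro seen banks steps _ _; rfl
  | succ fuel ih =>
      intro seen banks steps hb hs
      simp only [pvLoopA, pvLoopB]
      cases hg : seen.get? banks with
      | some first =>
          try dsimp only
          rw [hs]
      | none =>
          try dsimp only
          have hcon : seen.contains banks = false :=
            (PySem.Dict.get?_eq_none_iff_contains _ _).mp hg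
          rw [pv_step_eq banks hb, hs]
          refine ih _ _ _ (pv_stepB_ne_nil banks hb) ?_
          have hsz : (seen.insert banks ((seen.size : Nat) : Int)).size = seen.size + 1 := by
            rw [PySem.Dict.size_insert, hcon]
            simp
          rw [hsz]
          push_cast
          ring

-- ===== VERDICT (by name: the statement is the Claim_ definition above) =====
theorem part_two_spec : Claim_equal_part_two := by
  intro data _ hpre
  unfold Spec_part_two part_two part_two_alt
  refine pv_loop_eq (pvFuel data) PySem.Dict.empty data 0 hpre ?_
  rw [PySem.Dict.size_empty]
  rfl
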